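-- pv_equiv track=rewrite | github.com/MrBrantCode/unitest_baseline | mut_generate/mist_train_cf/cf_62050/solution.py | cheapestJump
-- ===== SOURCE A (Python) =====
-- def cheapestJump(A, B, C):
--     size = len(A)
--     next_jump = [-1]*size
--     dp = [float('inf')]*size
--     dp[-1] = A[-1]
--     steps = [0]*size
--
--     for i in range(size - 1, -1, -1):
--         for b in range(1, B + 1):
--             if i + b < size and A[i + b] != -1 and steps[i + b] + 1 <= C:
--                 if A[i] + dp[i + b] < dp[i] or (A[i] + dp[i + b] == dp[i] and (next_jump[i] == -1 or i + b < next_jump[i])):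
--                     dp[i] = A[i] + dp[i + b]
--                     next_jump[i] = i + b
--                     steps[i] = steps[i + b] + 1
--
--     if dp[0] == float('inf'):
--         return []
--
--     i, path = 0, []
--     while i != -1:
--         path.append(i + 1)
--         i = next_jump[i]
--     return path
-- ===== SOURCE B (Python) =====
-- def cheapestJump(A, B, C):
--     # O(n) monotonic-deque sliding-window minimum over dp (A scans a B-wide window per index).
--     n = len(A)
--     INF = float('inf')
--     dp = [INF] * n
--     nxt = [-1] * n
--     steps = [0] * n
--     dp[n - 1] = A[n - 1]
--     # deque of candidate indices, stored in a plain list: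
--     # live region is dq[lo:]; dq[-1] is the window's left end (smallest index),
--     # dq[lo] its right end (largest index).  dp strictly increases towards dq[-1]...
--     dq = []
--     lo = 0
--     for i in range(n - 1, -1, -1):
--         while lo < len(dq) and dq[lo] > i + B:
--             lo += 1                      # evict indices that fell out of the window [i+1, i+B]
--         if lo < len(dq):
--             j = dq[lo]                   # first index with minimal dp in the window
--             dp[i] = A[i] + dp[j]
--             nxt[i] = j
--             steps[i] = steps[j] + 1
--         if A[i] != -1 and steps[i] + 1 <= C:
--             while lo < len(dq) and dp[dq[-1]] >= dp[i]:
--                 dq.pop()                 # i dominates: smaller index, stays in window longer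
--             dq.append(i)
--     if dp[0] == INF:
--         return []
--     path, i = [], 0
--     while i != -1:
--         path.append(i + 1)
--         i = nxt[i]
--     return path
-- ===== Notes on version B (the rewrite author's own statement) =====
-- stated objective: faster
-- what changed: Replaces A's inner scan of all B jump targets per index by a monotonic-deque sliding-window minimum over dp (each valid index is pushed and popped at most once), keeping A's exact tie-breaking (first index attaining the minimum, infinite-cost chains included).
import Mathlib
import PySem

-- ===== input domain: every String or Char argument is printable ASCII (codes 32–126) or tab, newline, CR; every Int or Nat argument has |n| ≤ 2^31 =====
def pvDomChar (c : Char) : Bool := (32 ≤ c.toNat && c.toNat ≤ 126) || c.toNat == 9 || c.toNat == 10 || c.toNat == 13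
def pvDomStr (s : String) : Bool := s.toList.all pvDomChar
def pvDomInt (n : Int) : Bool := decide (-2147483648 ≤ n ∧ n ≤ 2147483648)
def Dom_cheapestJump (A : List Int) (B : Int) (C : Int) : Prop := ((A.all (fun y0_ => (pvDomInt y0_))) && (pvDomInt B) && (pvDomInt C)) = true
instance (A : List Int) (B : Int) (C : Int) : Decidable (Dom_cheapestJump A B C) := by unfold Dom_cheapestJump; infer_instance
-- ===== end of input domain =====

-- B replaces A's O(n·B) inner scan over all jump targets by an O(n) monotonic-deque
-- sliding-window minimum over dp; return values are proved identical on Pre_ (nonempty A).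

-- ===== PORT A =====
-- float('inf') sentinel modelled as `none`; pvExtLt/pvExtEq/pvAddE are Python's </==/+ on int-or-inf.
def pvExtLt : Option Int → Option Int → Bool
  | some a, some b => decide (a < b)
  | some _, none   => true
  | none,   _      => false

def pvExtEq : Option Int → Option Int → Bool
  | some a, some b => a == b
  | none,   none   => true
  | _,      _      => false

def pvAddE (a : Int) : Option Int → Option Int
  | some x => some (a + x)
  | none   => none

-- the final `while i != -1` walk (shared by both Pythons verbatim); fuel n+1 suffices since
-- next_jump is strictly increasing and bounded by n
def pvFollow (nxt : Int → Int) : Nat → Int → List Int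
  | 0, _ => []
  | fuel+1, i => if i = -1 then [] else (i + 1) :: pvFollow nxt fuel (nxt i)

-- one outer iteration of A: the inner `for b in range(1, B+1)` scan
def pvStepA (A : List Int) (n B C : Int)
    (st : (Int → Option Int) × (Int → Int) × (Int → Int)) (i : Int) :
    (Int → Option Int) × (Int → Int) × (Int → Int) :=
  (PySem.List.pyRange 1 (B + 1) 1).foldl (fun st b =>
    if i + b < n ∧ PySem.List.pyGetD A (i + b) 0 ≠ -1 ∧ st.2.2 (i + b) + 1 ≤ C then
      if pvExtLt (pvAddE (PySem.List.pyGetD A i 0) (st.1 (i + b))) (st.1 i) = true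
         ∨ (pvExtEq (pvAddE (PySem.List.pyGetD A i 0) (st.1 (i + b))) (st.1 i) = true
            ∧ (st.2.1 i = -1 ∨ i + b < st.2.1 i)) then
        (fun j => if j = i then pvAddE (PySem.List.pyGetD A i 0) (st.1 (i + b)) else st.1 j,
         fun j => if j = i then i + b else st.2.1 j,
         fun j => if j = i then st.2.2 (i + b) + 1 else st.2.2 j)
      else st
    else st) st

def cheapestJump (A : List Int) (B : Int) (C : Int) : List Int :=
  let n : Int := (A.length : Int)
  let st0 : (Int → Option Int) × (Int → Int) × (Int → Int) :=
    (fun j => if j = n - 1 then some (PySem.List.pyGetD A (-1) 0) else none,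
     fun _ => -1, fun _ => 0)
  let st := (PySem.List.pyRange (n - 1) (-1) (-1)).foldl (pvStepA A n B C) st0
  if st.1 0 = none then []
  else pvFollow st.2.1 (n.toNat + 1) 0

-- ===== PORT B =====
-- the deque holds candidate indices, head = smallest index (Python's dq[-1]),
-- last = largest index (Python's dq[lo]); `while dq[lo] > i+B: lo += 1`:
def pvEvict (r : Int) (dq : List Int) : List Int :=
  (dq.reverse.dropWhile (fun j => decide (r < j))).reverse

-- `if A[i] != -1 and steps[i]+1 <= C: while dp[dq[-1]] >= dp[i]: dq.pop(); dq.append(i)`: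
def pvPush (A : List Int) (C : Int) (dp : Int → Option Int) (steps : Int → Int)
    (i : Int) (dq : List Int) : List Int :=
  if PySem.List.pyGetD A i 0 ≠ -1 ∧ steps i + 1 ≤ C then
    i :: dq.dropWhile (fun k => !(pvExtLt (dp k) (dp i)))
  else dq

-- one outer iteration of B: evict, take the window minimum from the deque end, push i
def pvStepB (A : List Int) (B C : Int)
    (st : (Int → Option Int) × (Int → Int) × (Int → Int) × List Int) (i : Int) :
    (Int → Option Int) × (Int → Int) × (Int → Int) × List Int :=
  let dq1 := pvEvict (i + B) st.2.2.2
  match dq1.getLast? with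
  | none => (st.1, st.2.1, st.2.2.1, pvPush A C st.1 st.2.2.1 i dq1)
  | some j =>
      let dp2 : Int → Option Int :=
        fun k => if k = i then pvAddE (PySem.List.pyGetD A i 0) (st.1 j) else st.1 k
      let nxt2 : Int → Int := fun k => if k = i then j else st.2.1 k
      let steps2 : Int → Int := fun k => if k = i then st.2.2.1 j + 1 else st.2.2.1 k
      (dp2, nxt2, steps2, pvPush A C dp2 steps2 i dq1)

def cheapestJump_alt (A : List Int) (B : Int) (C : Int) : List Int :=
  let n : Int := (A.length : Int)
  let st0 : (Int → Option Int) × (Int → Int) × (Int → Int) × List Int :=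
    (fun j => if j = n - 1 then some (PySem.List.pyGetD A (n - 1) 0) else none,
     fun _ => -1, fun _ => 0, [])
  let st := (PySem.List.pyRange (n - 1) (-1) (-1)).foldl (pvStepB A B C) st0
  if st.1 0 = none then []
  else pvFollow st.2.1 (n.toNat + 1) 0

-- ===== PRECONDITION & SPEC =====
-- Pre_ excludes only the empty list, on which both Pythons raise IndexError (A[-1]).
def Pre_cheapestJump (A : List Int) (B : Int) (C : Int) : Prop := A ≠ []
instance (A : List Int) (B : Int) (C : Int) : Decidable (Pre_cheapestJump A B C) := by
  unfold Pre_cheapestJump; infer_instance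

def pvWitness_cheapestJump : List Int × Int × Int := ([1, 2, 3, 1], 2, 3)

def Spec_cheapestJump (A : List Int) (B : Int) (C : Int) (out : List Int) : Prop :=
  out = cheapestJump_alt A B C
instance (A : List Int) (B : Int) (C : Int) (out : List Int) : Decidable (Spec_cheapestJump A B C out) := by
  unfold Spec_cheapestJump; infer_instance

-- ===== CLAIM (what is proved, stated in full; the proofs are below) =====
def Claim_equal_cheapestJump : Prop := ∀ (A : List Int) (B : Int) (C : Int), Dom_cheapestJump A B C → Pre_cheapestJump A B C → Spec_cheapestJump A B C (cheapestJump A B C)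

-- ===== LEMMAS AND PROOFS =====

-- order facts about the int-or-inf value order
theorem pvExtLt_addE (a : Int) (x y : Option Int) :
    pvExtLt (pvAddE a x) (pvAddE a y) = pvExtLt x y := by
  cases x <;> cases y <;> simp [pvExtLt, pvAddE]

theorem pvExtLt_trans {x y z : Option Int} (h1 : pvExtLt x y = true) (h2 : pvExtLt y z = true) :
    pvExtLt x z = true := by
  cases x <;> cases y <;> cases z <;> simp_all [pvExtLt] <;> omega

theorem pvExtLt_neg_trans {x y z : Option Int} (h1 : pvExtLt x y = false) (h2 : pvExtLt y z = false) :
    pvExtLt x z = false := by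
  cases x <;> cases y <;> cases z <;> simp_all [pvExtLt] <;> omega

-- selection: first index of the candidate list attaining the minimal dp value (inf = none)
def pvSel (A : List Int) (C n : Int) (dp : Int → Option Int) (steps : Int → Int) :
    List Int → Option Int
  | [] => none
  | j :: t =>
    if j < n ∧ PySem.List.pyGetD A j 0 ≠ -1 ∧ steps j + 1 ≤ C then
      match pvSel A C n dp steps t with
      | none => some j
      | some k => if pvExtLt (dp k) (dp j) then some k else some j
    else pvSel A C n dp steps t

def pvComb (dp : Int → Option Int) (acc s : Option Int) : Option Int :=
  match s with
  | none => acc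
  | some j =>
    match acc with
    | none => some j
    | some k => if pvExtLt (dp j) (dp k) then some j else some k

-- what one outer iteration does to (dp, nxt, steps), as a function of the selected index
def pvApplyA (A : List Int) (i : Int)
    (st : (Int → Option Int) × (Int → Int) × (Int → Int)) :
    Option Int → (Int → Option Int) × (Int → Int) × (Int → Int)
  | none => st
  | some j =>
      (fun k => if k = i then pvAddE (PySem.List.pyGetD A i 0) (st.1 j) else st.1 k,
       fun k => if k = i then j else st.2.1 k,
       fun k => if k = i then st.2.2 j + 1 else st.2.2 k)

-- incremental first-minimum accumulator (what A's inner loop maintains)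
def pvStep1 (A : List Int) (C n : Int) (dp : Int → Option Int) (steps : Int → Int)
    (acc : Option Int) (j : Int) : Option Int :=
  if j < n ∧ PySem.List.pyGetD A j 0 ≠ -1 ∧ steps j + 1 ≤ C then
    match acc with
    | none => some j
    | some k => if pvExtLt (dp j) (dp k) then some j else some k
  else acc

theorem pvComb_none (dp : Int → Option Int) (s : Option Int) : pvComb dp none s = s := by
  cases s <;> rfl

theorem pvFoldStep1_eq_comb_sel (A : List Int) (C n : Int) (dp : Int → Option Int)
    (steps : Int → Int) (js : List Int) (acc : Option Int) :
    js.foldl (pvStep1 A C n dp steps) acc = pvComb dp acc (pvSel A C n dp steps js) := by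
  induction js generalizing acc with
  | nil => cases acc <;> rfl
  | cons j t ih =>
    simp only [List.foldl_cons, ih, pvSel]
    by_cases hg : j < n ∧ PySem.List.pyGetD A j 0 ≠ -1 ∧ steps j + 1 ≤ C
    · simp only [pvStep1, if_pos hg]
      cases acc with
      | none =>
        cases hs : pvSel A C n dp steps t with
        | none => simp [pvComb]
        | some m =>
          by_cases h1 : pvExtLt (dp m) (dp j) = true
          · simp [pvComb, h1]
          · simp [pvComb, h1]
      | some k =>
        cases hs : pvSel A C n dp steps t with
        | none =>
          by_cases h1 : pvExtLt (dp j) (dp k) = true <;> simp [pvComb, h1]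
        | some m =>
          by_cases hP : pvExtLt (dp m) (dp j) = true <;>
            by_cases hQ : pvExtLt (dp j) (dp k) = true
          · have hR : pvExtLt (dp m) (dp k) = true := pvExtLt_trans hP hQ
            simp [pvComb, hP, hQ, hR]
          · simp [pvComb, hP, hQ]
          · simp [pvComb, hP, hQ]
          · have hR : pvExtLt (dp m) (dp k) = false :=
              pvExtLt_neg_trans (Bool.eq_false_iff.mpr hP) (Bool.eq_false_iff.mpr hQ)
            simp [pvComb, hP, hQ, hR]
    · simp only [pvStep1, if_neg hg]

-- A's inner loop over b = 1..B equals one pvApplyA of the selected candidate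
theorem pvInnerA (A : List Int) (n B C i : Int) (hi : 0 ≤ i)
    (base : (Int → Option Int) × (Int → Int) × (Int → Int))
    (bs : List Int) (acc : Option Int)
    (h1 : ∀ b ∈ bs, 1 ≤ b)
    (h2 : ∀ b ∈ bs, i + b < n → base.1 i = none)
    (h3 : base.2.1 i = -1)
    (h4 : ∀ k, acc = some k → i < k ∧ ∀ b ∈ bs, k < i + b)
    (h5 : bs.Pairwise (· < ·)) :
    bs.foldl (fun (st : (Int → Option Int) × (Int → Int) × (Int → Int)) b =>
      if i + b < n ∧ PySem.List.pyGetD A (i + b) 0 ≠ -1 ∧ st.2.2 (i + b) + 1 ≤ C then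
        if pvExtLt (pvAddE (PySem.List.pyGetD A i 0) (st.1 (i + b))) (st.1 i) = true
           ∨ (pvExtEq (pvAddE (PySem.List.pyGetD A i 0) (st.1 (i + b))) (st.1 i) = true
              ∧ (st.2.1 i = -1 ∨ i + b < st.2.1 i)) then
          (fun j => if j = i then pvAddE (PySem.List.pyGetD A i 0) (st.1 (i + b)) else st.1 j,
           fun j => if j = i then i + b else st.2.1 j,
           fun j => if j = i then st.2.2 (i + b) + 1 else st.2.2 j)
        else st
      else st) (pvApplyA A i base acc)
    = pvApplyA A i base ((bs.map (i + ·)).foldl (pvStep1 A C n base.1 base.2.2) acc) := by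
  induction bs generalizing acc with
  | nil => rfl
  | cons b bs ih =>
    rw [List.pairwise_cons] at h5
    have hb1 : 1 ≤ b := h1 b List.mem_cons_self
    have hne : i + b ≠ i := by omega
    have hstep :
        (if i + b < n ∧ PySem.List.pyGetD A (i + b) 0 ≠ -1
            ∧ (pvApplyA A i base acc).2.2 (i + b) + 1 ≤ C then
          if pvExtLt (pvAddE (PySem.List.pyGetD A i 0) ((pvApplyA A i base acc).1 (i + b)))
              ((pvApplyA A i base acc).1 i) = true
             ∨ (pvExtEq (pvAddE (PySem.List.pyGetD A i 0) ((pvApplyA A i base acc).1 (i + b)))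
                  ((pvApplyA A i base acc).1 i) = true
                ∧ ((pvApplyA A i base acc).2.1 i = -1 ∨ i + b < (pvApplyA A i base acc).2.1 i)) then
            (fun j => if j = i then pvAddE (PySem.List.pyGetD A i 0)
                  ((pvApplyA A i base acc).1 (i + b)) else (pvApplyA A i base acc).1 j,
             fun j => if j = i then i + b else (pvApplyA A i base acc).2.1 j,
             fun j => if j = i then (pvApplyA A i base acc).2.2 (i + b) + 1
                  else (pvApplyA A i base acc).2.2 j)
          else pvApplyA A i base acc
        else pvApplyA A i base acc)
        = pvApplyA A i base (pvStep1 A C n base.1 base.2.2 acc (i + b)) := by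
      cases acc with
      | none =>
        simp only [pvApplyA, pvStep1]
        by_cases hg : i + b < n ∧ PySem.List.pyGetD A (i + b) 0 ≠ -1 ∧ base.2.2 (i + b) + 1 ≤ C
        · rw [if_pos hg, if_pos hg]
          have hdpi : base.1 i = none := h2 b List.mem_cons_self hg.1
          have hcond : pvExtLt (pvAddE (PySem.List.pyGetD A i 0) (base.1 (i + b))) (base.1 i) = true
              ∨ (pvExtEq (pvAddE (PySem.List.pyGetD A i 0) (base.1 (i + b))) (base.1 i) = true
                 ∧ (base.2.1 i = -1 ∨ i + b < base.2.1 i)) := by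
            rw [hdpi, h3]
            cases base.1 (i + b) with
            | none => exact Or.inr ⟨rfl, Or.inl rfl⟩
            | some x => exact Or.inl rfl
          rw [if_pos hcond]
        · rw [if_neg hg, if_neg hg]
      | some k =>
        obtain ⟨hik, hkb⟩ := h4 k rfl
        have hkb' : k < i + b := hkb b List.mem_cons_self
        simp only [pvApplyA, pvStep1]
        simp only [if_neg hne, eq_self_iff_true, if_true]
        by_cases hg : i + b < n ∧ PySem.List.pyGetD A (i + b) 0 ≠ -1 ∧ base.2.2 (i + b) + 1 ≤ C
        · rw [if_pos hg, if_pos hg]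
          have hnk : ¬ (k = -1 ∨ i + b < k) := by omega
          by_cases hlt : pvExtLt (base.1 (i + b)) (base.1 k) = true
          · have hcond : pvExtLt (pvAddE (PySem.List.pyGetD A i 0) (base.1 (i + b)))
                (pvAddE (PySem.List.pyGetD A i 0) (base.1 k)) = true
                ∨ (pvExtEq (pvAddE (PySem.List.pyGetD A i 0) (base.1 (i + b)))
                    (pvAddE (PySem.List.pyGetD A i 0) (base.1 k)) = true ∧ (k = -1 ∨ i + b < k)) :=
              Or.inl (by rw [pvExtLt_addE]; exact hlt)
            rw [if_pos hcond, if_pos hlt]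
            refine Prod.ext ?_ (Prod.ext ?_ ?_) <;>
              · funext j
                by_cases hj : j = i <;> simp [hj, hne]
          · have hcond : ¬ (pvExtLt (pvAddE (PySem.List.pyGetD A i 0) (base.1 (i + b)))
                (pvAddE (PySem.List.pyGetD A i 0) (base.1 k)) = true
                ∨ (pvExtEq (pvAddE (PySem.List.pyGetD A i 0) (base.1 (i + b)))
                    (pvAddE (PySem.List.pyGetD A i 0) (base.1 k)) = true ∧ (k = -1 ∨ i + b < k))) := by
              rw [pvExtLt_addE]
              push_neg
              exact ⟨hlt, fun _ => ⟨by omega, by omega⟩⟩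
            rw [if_neg hcond, if_neg hlt]
        · rw [if_neg hg, if_neg hg]
    rw [List.foldl_cons, List.map_cons, List.foldl_cons, hstep]
    refine ih _ (fun x hx => h1 x (List.mem_cons_of_mem _ hx))
      (fun x hx => h2 x (List.mem_cons_of_mem _ hx)) ?_ h5.2
    intro k hk
    simp only [pvStep1] at hk
    by_cases hg : i + b < n ∧ PySem.List.pyGetD A (i + b) 0 ≠ -1 ∧ base.2.2 (i + b) + 1 ≤ C
    · rw [if_pos hg] at hk
      cases hacc : acc with
      | none =>
        simp only [hacc] at hk
        have hk' : i + b = k := by simpa using hk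
        subst hk'
        exact ⟨by omega, fun b' hb' => by have := h5.1 b' hb'; omega⟩
      | some k0 =>
        simp only [hacc] at hk
        obtain ⟨hik0, hk0b⟩ := h4 k0 hacc
        by_cases hlt2 : pvExtLt (base.1 (i + b)) (base.1 k0) = true
        · rw [if_pos hlt2] at hk
          have hk' : i + b = k := by simpa using hk
          subst hk'
          exact ⟨by omega, fun b' hb' => by have := h5.1 b' hb'; omega⟩
        · rw [if_neg hlt2] at hk
          have hk' : k0 = k := by simpa using hk
          subst hk'
          exact ⟨hik0, fun b' hb' => by
            have h6 := hk0b b' (List.mem_cons_of_mem _ hb')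
            omega⟩
    · rw [if_neg hg] at hk
      obtain ⟨hik0, hk0b⟩ := h4 k hk
      exact ⟨hik0, fun b' hb' => hk0b b' (List.mem_cons_of_mem _ hb')⟩

-- the skyline the deque maintains: push the window elements back to front
def pvS (A : List Int) (C : Int) (dp : Int → Option Int) (steps : Int → Int) :
    List Int → List Int
  | [] => []
  | j :: t => pvPush A C dp steps j (pvS A C dp steps t)

theorem pvS_mem {A : List Int} {C : Int} {dp : Int → Option Int} {steps : Int → Int}
    {ws : List Int} {k : Int} (h : k ∈ pvS A C dp steps ws) : k ∈ ws := by
  induction ws with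
  | nil => simpa [pvS] using h
  | cons j t ih =>
    simp only [pvS, pvPush] at h
    split at h
    · rcases List.mem_cons.mp h with rfl | h2
      · exact List.mem_cons_self
      · exact List.mem_cons_of_mem _ (ih ((List.dropWhile_sublist _).subset h2))
    · exact List.mem_cons_of_mem _ (ih h)

theorem pvDropWhile_all (dp : Int → Option Int) (j : Int) (m : List Int)
    (hm : m.Pairwise (fun x y => pvExtLt (dp y) (dp x) = true)) :
    ∀ x ∈ m.dropWhile (fun k => !(pvExtLt (dp k) (dp j))), pvExtLt (dp x) (dp j) = true := by
  induction m with
  | nil => simp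
  | cons a t ih =>
    rw [List.pairwise_cons] at hm
    by_cases ha : pvExtLt (dp a) (dp j) = true
    · rw [List.dropWhile_cons_of_neg (by simp [ha])]
      intro x hx
      rcases List.mem_cons.mp hx with rfl | hx
      · exact ha
      · exact pvExtLt_trans (hm.1 x hx) ha
    · rw [List.dropWhile_cons_of_pos (by simp [Bool.eq_false_iff.mpr ha])]
      exact ih hm.2

theorem pvS_pairwise_dp (A : List Int) (C : Int) (dp : Int → Option Int) (steps : Int → Int)
    (ws : List Int) :
    (pvS A C dp steps ws).Pairwise (fun x y => pvExtLt (dp y) (dp x) = true) := by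
  induction ws with
  | nil => simp [pvS]
  | cons j t ih =>
    simp only [pvS, pvPush]
    split
    · exact List.Pairwise.cons (fun x hx => pvDropWhile_all dp j _ ih x hx)
        (ih.sublist (List.dropWhile_sublist _))
    · exact ih

theorem pvS_pairwise_lt {A : List Int} {C : Int} {dp : Int → Option Int} {steps : Int → Int}
    {ws : List Int} (h : ws.Pairwise (· < ·)) :
    (pvS A C dp steps ws).Pairwise (· < ·) := by
  induction ws with
  | nil => simp [pvS]
  | cons j t ih =>
    rw [List.pairwise_cons] at h
    simp only [pvS, pvPush]
    split
    · exact List.Pairwise.cons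
        (fun x hx => h.1 x (pvS_mem ((List.dropWhile_sublist _).subset hx)))
        ((ih h.2).sublist (List.dropWhile_sublist _))
    · exact ih h.2

theorem pvS_getLast_eq_sel (A : List Int) (C n : Int) (dp : Int → Option Int)
    (steps : Int → Int) (ws : List Int) (h : ∀ j ∈ ws, j < n) :
    (pvS A C dp steps ws).getLast? = pvSel A C n dp steps ws := by
  induction ws with
  | nil => rfl
  | cons j t ih =>
    have hjn : j < n := h j List.mem_cons_self
    have ih' := ih (fun x hx => h x (List.mem_cons_of_mem _ hx))
    simp only [pvS, pvPush, pvSel]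
    by_cases hv : PySem.List.pyGetD A j 0 ≠ -1 ∧ steps j + 1 ≤ C
    · rw [if_pos hv, if_pos ⟨hjn, hv.1, hv.2⟩, ← ih']
      cases hD : (pvS A C dp steps t).dropWhile (fun k => !(pvExtLt (dp k) (dp j))) with
      | nil =>
        have hall : ∀ x ∈ pvS A C dp steps t, pvExtLt (dp x) (dp j) = false := by
          intro x hx
          simpa using List.dropWhile_eq_nil_iff.mp hD x hx
        cases hS : (pvS A C dp steps t).getLast? with
        | none => rfl
        | some m =>
          have hmem : m ∈ pvS A C dp steps t := List.mem_of_getLast? hS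
          simp [hall m hmem]
      | cons hh rest =>
        have hDn : (pvS A C dp steps t).dropWhile (fun k => !(pvExtLt (dp k) (dp j))) ≠ [] := by
          rw [hD]; simp
        obtain ⟨m, hm⟩ : ∃ m, ((pvS A C dp steps t).dropWhile
            (fun k => !(pvExtLt (dp k) (dp j)))).getLast? = some m := by
          simp [List.getLast?_eq_some_getLast hDn]
        have hmem : m ∈ (pvS A C dp steps t).dropWhile (fun k => !(pvExtLt (dp k) (dp j))) :=
          List.mem_of_getLast? hm
        have hmlt : pvExtLt (dp m) (dp j) = true :=
          pvDropWhile_all dp j _ (pvS_pairwise_dp A C dp steps t) m hmem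
        have hlast : (pvS A C dp steps t).getLast? = some m := by
          obtain ⟨pre, hpre⟩ := List.dropWhile_suffix
            (l := pvS A C dp steps t) (fun k => !(pvExtLt (dp k) (dp j)))
          rw [← hpre, List.getLast?_append_of_ne_nil _ hDn, hm]
        have h1 : (j :: hh :: rest).getLast? = (hh :: rest).getLast? := by
          rw [show (j :: hh :: rest) = [j] ++ (hh :: rest) from rfl]
          exact List.getLast?_append_of_ne_nil _ (by simp)
        rw [hD] at hm
        rw [h1, hm, hlast]
        simp [hmlt]
    · rw [if_neg hv, if_neg (by tauto), ih']

theorem pvDropWhile_congr {p q : Int → Bool} {l : List Int} (h : ∀ x ∈ l, p x = q x) :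
    l.dropWhile p = l.dropWhile q := by
  induction l with
  | nil => rfl
  | cons a t ih =>
    have ha := h a List.mem_cons_self
    cases hq : q a
    · rw [List.dropWhile_cons_of_neg (by simp [ha, hq]), List.dropWhile_cons_of_neg (by simp [hq])]
    · rw [List.dropWhile_cons_of_pos (by simp [ha, hq]), List.dropWhile_cons_of_pos hq]
      exact ih (fun x hx => h x (List.mem_cons_of_mem _ hx))

theorem pvS_congr {A : List Int} {C : Int} {dp dp' : Int → Option Int} {steps steps' : Int → Int}
    {ws : List Int} (h : ∀ j ∈ ws, dp j = dp' j ∧ steps j = steps' j) :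
    pvS A C dp steps ws = pvS A C dp' steps' ws := by
  induction ws with
  | nil => rfl
  | cons j t ih =>
    have ih' := ih (fun x hx => h x (List.mem_cons_of_mem _ hx))
    have hj := h j List.mem_cons_self
    simp only [pvS, pvPush, ← hj.1, ← hj.2, ← ih']
    split
    · congr 1
      apply pvDropWhile_congr
      intro x hx
      rw [(h x (List.mem_cons_of_mem _ (pvS_mem hx))).1]
    · rfl

-- takeWhile/dropWhile bookkeeping on strictly ascending lists
theorem pvTakeDrop_comm (p : Int → Bool) (r : Int) (m : List Int) (hm : m.Pairwise (· < ·)) :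
    (m.dropWhile p).takeWhile (fun j => decide (j ≤ r))
      = (m.takeWhile (fun j => decide (j ≤ r))).dropWhile p := by
  induction m with
  | nil => rfl
  | cons x t ih =>
    rw [List.pairwise_cons] at hm
    cases hp : p x
    · rw [List.dropWhile_cons_of_neg (by simp [hp])]
      by_cases hxr : x ≤ r
      · rw [List.takeWhile_cons_of_pos (by simpa using hxr),
          List.dropWhile_cons_of_neg (by simp [hp])]
      · rw [List.takeWhile_cons_of_neg (by simpa using hxr)]
        rfl
    · rw [List.dropWhile_cons_of_pos hp]
      by_cases hxr : x ≤ r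
      · rw [List.takeWhile_cons_of_pos (by simpa using hxr),
          List.dropWhile_cons_of_pos hp]
        exact ih hm.2
      · rw [List.takeWhile_cons_of_neg (by simpa using hxr), List.dropWhile_nil]
        cases hD : t.dropWhile p with
        | nil => rfl
        | cons a s =>
          have hat : a ∈ t := (List.dropWhile_sublist _).subset (by rw [hD]; exact List.mem_cons_self)
          have : ¬ (a ≤ r) := by
            have := hm.1 a hat
            omega
          rw [List.takeWhile_cons_of_neg (by simpa using this)]

theorem pvTakeTake {r s : Int} (hrs : r ≤ s) (m : List Int) :
    (m.takeWhile (fun j => decide (j ≤ s))).takeWhile (fun j => decide (j ≤ r))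
      = m.takeWhile (fun j => decide (j ≤ r)) := by
  induction m with
  | nil => rfl
  | cons x t ih =>
    by_cases hxr : x ≤ r
    · rw [List.takeWhile_cons_of_pos (by simpa using (le_trans hxr hrs)),
        List.takeWhile_cons_of_pos (by simpa using hxr),
        List.takeWhile_cons_of_pos (by simpa using hxr), ih]
    · by_cases hxs : x ≤ s
      · rw [List.takeWhile_cons_of_pos (by simpa using hxs),
          List.takeWhile_cons_of_neg (by simpa using hxr),
          List.takeWhile_cons_of_neg (by simpa using hxr)]
      · rw [List.takeWhile_cons_of_neg (by simpa using hxs),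
          List.takeWhile_cons_of_neg (by simpa using hxr)]
        rfl

theorem pvS_takeWhile (A : List Int) (C r : Int) (dp : Int → Option Int) (steps : Int → Int)
    (ws : List Int) (h : ws.Pairwise (· < ·)) :
    pvS A C dp steps (ws.takeWhile (fun j => decide (j ≤ r)))
      = (pvS A C dp steps ws).takeWhile (fun j => decide (j ≤ r)) := by
  induction ws with
  | nil => rfl
  | cons j t ih =>
    rw [List.pairwise_cons] at h
    by_cases hjr : j ≤ r
    · rw [List.takeWhile_cons_of_pos (by simpa using hjr)]
      simp only [pvS, pvPush, ih h.2]
      split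
      · rw [List.takeWhile_cons_of_pos (by simpa using hjr),
          pvTakeDrop_comm _ _ _ (pvS_pairwise_lt h.2)]
      · rfl
    · rw [List.takeWhile_cons_of_neg (by simpa using hjr)]
      show ([] : List Int) = _
      cases hS : pvS A C dp steps (j :: t) with
      | nil => rfl
      | cons a s =>
        have ha : a ∈ j :: t := pvS_mem (by rw [hS]; exact List.mem_cons_self)
        have har : ¬ (a ≤ r) := by
          rcases List.mem_cons.mp ha with rfl | hat
          · exact hjr
          · have := h.1 a hat; omega
        rw [List.takeWhile_cons_of_neg (by simpa using har)]

theorem pvTakeWhile_append_singleton_neg {p : Int → Bool} {x : Int} (l : List Int)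
    (hx : p x = false) : (l ++ [x]).takeWhile p = l.takeWhile p := by
  induction l with
  | nil => simp [List.takeWhile_cons, hx]
  | cons a t ih =>
    cases ha : p a
    · rw [List.cons_append, List.takeWhile_cons_of_neg (by simp [ha]),
        List.takeWhile_cons_of_neg (by simp [ha])]
    · rw [List.cons_append, List.takeWhile_cons_of_pos ha,
        List.takeWhile_cons_of_pos ha, ih]

theorem pvEvict_eq_takeWhile (r : Int) (dq : List Int) (h : dq.Pairwise (· < ·)) :
    pvEvict r dq = dq.takeWhile (fun j => decide (j ≤ r)) := by
  induction dq using List.reverseRecOn with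
  | nil => rfl
  | append_singleton l x ih =>
    rw [List.pairwise_append] at h
    by_cases hxr : r < x
    · have : pvEvict r (l ++ [x]) = pvEvict r l := by
        simp only [pvEvict, List.reverse_append, List.reverse_cons, List.reverse_nil,
          List.nil_append, List.cons_append]
        rw [List.dropWhile_cons_of_pos (by simpa using hxr)]
      rw [this, ih h.1, pvTakeWhile_append_singleton_neg _ (by simpa using hxr)]
    · have : pvEvict r (l ++ [x]) = l ++ [x] := by
        simp only [pvEvict, List.reverse_append, List.reverse_cons, List.reverse_nil,
          List.nil_append, List.cons_append]
        rw [List.dropWhile_cons_of_neg (by simpa using hxr)]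
        simp
      rw [this, List.takeWhile_eq_self_iff.mpr]
      intro y hy
      rcases List.mem_append.mp hy with hyl | hyx
      · have := h.2.2 y hyl x List.mem_cons_self
        simp; omega
      · simp at hyx
        simp; omega

theorem pvPush_takeWhile (A : List Int) (C r s i : Int) (dp : Int → Option Int)
    (steps : Int → Int) (X : List Int) (hrs : r ≤ s) (hX : X.Pairwise (· < ·)) :
    (pvPush A C dp steps i (X.takeWhile (fun j => decide (j ≤ s)))).takeWhile
        (fun j => decide (j ≤ r))
      = (pvPush A C dp steps i X).takeWhile (fun j => decide (j ≤ r)) := by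
  unfold pvPush
  split
  · by_cases hir : i ≤ r
    · rw [List.takeWhile_cons_of_pos (by simpa using hir),
        List.takeWhile_cons_of_pos (by simpa using hir)]
      congr 1
      rw [pvTakeDrop_comm _ _ _ (hX.sublist (List.takeWhile_sublist _)),
        pvTakeDrop_comm _ _ _ hX, pvTakeTake hrs]
    · rw [List.takeWhile_cons_of_neg (by simpa using hir),
        List.takeWhile_cons_of_neg (by simpa using hir)]
  · exact pvTakeTake hrs X

-- window plumbing
theorem pvMap_add_pyRange (i B : Int) :
    (PySem.List.pyRange 1 (B + 1) 1).map (i + ·) = PySem.List.pyRange (i + 1) (i + B + 1) 1 := by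
  rw [PySem.List.pyRange_one, PySem.List.pyRange_one, List.map_map]
  have he : i + B + 1 - (i + 1) = B + 1 - 1 := by ring
  rw [he]
  congr 1
  funext k
  simp [Function.comp]
  ring

theorem pvTake_pyRange_aux (fuel : Nat) : ∀ a b r : Int, (b - a).toNat ≤ fuel →
    (PySem.List.pyRange a b 1).takeWhile (fun j => decide (j ≤ r))
      = PySem.List.pyRange a (min b (r + 1)) 1 := by
  induction fuel with
  | zero =>
    intro a b r hf
    have hab : b ≤ a := by omega
    rw [PySem.List.pyRange_one_eq_nil hab, PySem.List.pyRange_one_eq_nil (by omega)]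
    rfl
  | succ f ih =>
    intro a b r hf
    by_cases hab : b ≤ a
    · rw [PySem.List.pyRange_one_eq_nil hab, PySem.List.pyRange_one_eq_nil (by omega)]
      rfl
    · rw [PySem.List.pyRange_one_cons (by omega)]
      by_cases har : a ≤ r
      · rw [List.takeWhile_cons_of_pos (by simpa using har),
          PySem.List.pyRange_one_cons (lt_min (by omega) (by omega)), ih (a + 1) b r (by omega)]
      · rw [List.takeWhile_cons_of_neg (by simpa using har),
          PySem.List.pyRange_one_eq_nil (by omega)]

theorem pvTake_pyRange (a b r : Int) :
    (PySem.List.pyRange a b 1).takeWhile (fun j => decide (j ≤ r))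
      = PySem.List.pyRange a (min b (r + 1)) 1 :=
  pvTake_pyRange_aux (b - a).toNat a b r le_rfl

theorem pvSel_append_ge (A : List Int) (C n : Int) (dp : Int → Option Int) (steps : Int → Int)
    (X Y : List Int) (h : ∀ j ∈ Y, n ≤ j) :
    pvSel A C n dp steps (X ++ Y) = pvSel A C n dp steps X := by
  induction X with
  | nil =>
    simp only [List.nil_append]
    induction Y with
    | nil => rfl
    | cons y Y ihY =>
      have : ¬ (y < n ∧ PySem.List.pyGetD A y 0 ≠ -1 ∧ steps y + 1 ≤ C) := by
        have := h y List.mem_cons_self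
        intro hc
        omega
      simp only [pvSel, if_neg this]
      exact ihY (fun j hj => h j (List.mem_cons_of_mem _ hj))
  | cons x X ih =>
    simp only [List.cons_append, pvSel, ih]

theorem pvSel_window (A : List Int) (C n i B : Int) (dp : Int → Option Int) (steps : Int → Int)
    (hin : i ≤ n - 1) :
    pvSel A C n dp steps (PySem.List.pyRange (i + 1) (i + B + 1) 1)
      = pvSel A C n dp steps
          ((PySem.List.pyRange (i + 1) n 1).takeWhile (fun j => decide (j ≤ i + B))) := by
  rw [pvTake_pyRange]
  by_cases hb : i + B + 1 ≤ n
  · rw [min_eq_right (by omega)]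
  · rw [min_eq_left (by omega)]
    rw [PySem.List.pyRange_one_append (i + 1) n (i + B + 1) (by omega) (by omega)]
    exact pvSel_append_ge A C n dp steps _ _
      (fun j hj => ((PySem.List.mem_pyRange_one).mp hj).1)
-- the coupling invariant between A's state and B's state before iteration i
def pvInv (A : List Int) (Bp C n i : Int)
    (stA : (Int → Option Int) × (Int → Int) × (Int → Int))
    (stB : (Int → Option Int) × (Int → Int) × (Int → Int) × List Int) : Prop :=
  stA.1 = stB.1 ∧ stA.2.1 = stB.2.1 ∧ stA.2.2 = stB.2.2.1
  ∧ (∀ j : Int, j ≤ i → stA.1 j = (if j = n - 1 then some (PySem.List.pyGetD A (-1) 0) else none)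
        ∧ stA.2.1 j = -1 ∧ stA.2.2 j = 0)
  ∧ stB.2.2.2.Pairwise (· < ·)
  ∧ (∀ k ∈ stB.2.2.2, i < k ∧ k ≤ n - 1)
  ∧ stB.2.2.2.takeWhile (fun j => decide (j ≤ i + Bp))
      = (pvS A C stA.1 stA.2.2 (PySem.List.pyRange (i + 1) n 1)).takeWhile
          (fun j => decide (j ≤ i + Bp))

theorem pvStep_inv (A : List Int) (Bp C n i : Int) (hn : n = (A.length : Int))
    (hi : 0 ≤ i) (hin : i ≤ n - 1)
    (stA : (Int → Option Int) × (Int → Int) × (Int → Int))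
    (stB : (Int → Option Int) × (Int → Int) × (Int → Int) × List Int)
    (h : pvInv A Bp C n i stA stB) :
    pvInv A Bp C n (i - 1) (pvStepA A n Bp C stA i) (pvStepB A Bp C stB i) := by
  obtain ⟨hdp, hnxt, hsteps, huntouched, hpair, hmem, htake⟩ := h
  have hLpair : (PySem.List.pyRange (i + 1) n 1).Pairwise (· < ·) :=
    PySem.List.pairwise_lt_pyRange_one _ _
  have hWmem : ∀ j ∈ (PySem.List.pyRange (i + 1) n 1).takeWhile
      (fun j => decide (j ≤ i + Bp)), i < j ∧ j < n := by
    intro j hj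
    have := PySem.List.mem_pyRange_one.mp ((List.takeWhile_sublist _).subset hj)
    omega
  -- A's iteration produces pvApplyA of the window selection
  have hA : pvStepA A n Bp C stA i
      = pvApplyA A i stA (pvSel A C n stA.1 stA.2.2
          ((PySem.List.pyRange (i + 1) n 1).takeWhile (fun j => decide (j ≤ i + Bp)))) := by
    have e1 := pvInnerA A n Bp C i hi stA (PySem.List.pyRange 1 (Bp + 1) 1) none
      (fun b hb => (PySem.List.mem_pyRange_one.mp hb).1)
      (fun b hb hbn => by
        have hb1 : 1 ≤ b := (PySem.List.mem_pyRange_one.mp hb).1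
        have hne : i ≠ n - 1 := by omega
        have h0 := (huntouched i le_rfl).1
        rwa [if_neg hne] at h0)
      ((huntouched i le_rfl).2.1)
      (fun k hk => by simp at hk)
      (PySem.List.pairwise_lt_pyRange_one _ _)
    rw [pvMap_add_pyRange, pvFoldStep1_eq_comb_sel, pvComb_none,
      pvSel_window A C n i Bp _ _ hin] at e1
    exact e1
  -- B's deque after eviction is the skyline of the window
  have hdq1 : pvEvict (i + Bp) stB.2.2.2
      = pvS A C stA.1 stA.2.2 ((PySem.List.pyRange (i + 1) n 1).takeWhile
          (fun j => decide (j ≤ i + Bp))) := by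
    rw [pvEvict_eq_takeWhile _ _ hpair, htake, ← pvS_takeWhile _ _ _ _ _ _ hLpair]
  have hlast : (pvEvict (i + Bp) stB.2.2.2).getLast?
      = pvSel A C n stA.1 stA.2.2 ((PySem.List.pyRange (i + 1) n 1).takeWhile
          (fun j => decide (j ≤ i + Bp))) := by
    rw [hdq1]
    exact pvS_getLast_eq_sel A C n _ _ _ (fun j hj => (hWmem j hj).2)
  have hdq1pair : (pvEvict (i + Bp) stB.2.2.2).Pairwise (· < ·) := by
    rw [pvEvict_eq_takeWhile _ _ hpair]
    exact hpair.sublist (List.takeWhile_sublist _)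
  have hdq1mem : ∀ k ∈ pvEvict (i + Bp) stB.2.2.2, i < k ∧ k ≤ n - 1 := by
    intro k hk
    rw [pvEvict_eq_takeWhile _ _ hpair] at hk
    exact hmem k ((List.takeWhile_sublist _).subset hk)
  have hXpair : (pvS A C stA.1 stA.2.2 (PySem.List.pyRange (i + 1) n 1)).Pairwise (· < ·) :=
    pvS_pairwise_lt hLpair
  have hii : i - 1 + 1 = i := by omega
  have hrange : PySem.List.pyRange (i - 1 + 1) n 1 = i :: PySem.List.pyRange (i + 1) n 1 := by
    rw [hii]
    exact PySem.List.pyRange_one_cons (by omega)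
  rw [hA]
  cases hsel : pvSel A C n stA.1 stA.2.2 ((PySem.List.pyRange (i + 1) n 1).takeWhile
      (fun j => decide (j ≤ i + Bp))) with
  | none =>
    have hBeq : pvStepB A Bp C stB i
        = (stB.1, stB.2.1, stB.2.2.1, pvPush A C stB.1 stB.2.2.1 i (pvEvict (i + Bp) stB.2.2.2)) := by
      simp only [pvStepB]
      rw [hlast, hsel]
    rw [hBeq]
    refine ⟨hdp, hnxt, hsteps, ?_, ?_, ?_, ?_⟩
    · intro j hj
      exact huntouched j (by omega)
    · show (pvPush A C stB.1 stB.2.2.1 i (pvEvict (i + Bp) stB.2.2.2)).Pairwise (· < ·)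
      unfold pvPush
      split
      · exact List.Pairwise.cons
          (fun x hx => (hdq1mem x ((List.dropWhile_sublist _).subset hx)).1)
          (hdq1pair.sublist (List.dropWhile_sublist _))
      · exact hdq1pair
    · show ∀ k ∈ pvPush A C stB.1 stB.2.2.1 i (pvEvict (i + Bp) stB.2.2.2), i - 1 < k ∧ k ≤ n - 1
      intro k hk
      unfold pvPush at hk
      split at hk
      · rcases List.mem_cons.mp hk with rfl | hk2
        · exact ⟨by omega, hin⟩
        · have := hdq1mem k ((List.dropWhile_sublist _).subset hk2)
          exact ⟨by omega, this.2⟩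
      · have := hdq1mem k hk
        exact ⟨by omega, this.2⟩
    · show (pvPush A C stB.1 stB.2.2.1 i (pvEvict (i + Bp) stB.2.2.2)).takeWhile
          (fun j => decide (j ≤ i - 1 + Bp))
        = (pvS A C stA.1 stA.2.2 (PySem.List.pyRange (i - 1 + 1) n 1)).takeWhile
          (fun j => decide (j ≤ i - 1 + Bp))
      rw [hrange, ← hdp, ← hsteps, hdq1, pvS_takeWhile _ _ _ _ _ _ hLpair,
        show (pvS A C stA.1 stA.2.2 (i :: PySem.List.pyRange (i + 1) n 1))
            = pvPush A C stA.1 stA.2.2 i (pvS A C stA.1 stA.2.2 (PySem.List.pyRange (i + 1) n 1))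
          from rfl]
      exact pvPush_takeWhile A C (i - 1 + Bp) (i + Bp) i _ _ _ (by omega) hXpair
  | some j =>
    have hBeq : pvStepB A Bp C stB i
        = ((fun k => if k = i then pvAddE (PySem.List.pyGetD A i 0) (stB.1 j) else stB.1 k),
           (fun k => if k = i then j else stB.2.1 k),
           (fun k => if k = i then stB.2.2.1 j + 1 else stB.2.2.1 k),
           pvPush A C
             (fun k => if k = i then pvAddE (PySem.List.pyGetD A i 0) (stB.1 j) else stB.1 k)
             (fun k => if k = i then stB.2.2.1 j + 1 else stB.2.2.1 k)
             i (pvEvict (i + Bp) stB.2.2.2)) := by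
      simp only [pvStepB]
      rw [hlast, hsel]
    rw [hBeq, ← hdp, ← hnxt, ← hsteps]
    refine ⟨rfl, rfl, rfl, ?_, ?_, ?_, ?_⟩
    · intro j' hj'
      have hne : j' ≠ i := by omega
      simp only [pvApplyA, if_neg hne]
      exact huntouched j' (by omega)
    · unfold pvPush
      split
      · exact List.Pairwise.cons
          (fun x hx => (hdq1mem x ((List.dropWhile_sublist _).subset hx)).1)
          (hdq1pair.sublist (List.dropWhile_sublist _))
      · exact hdq1pair
    · intro k hk
      unfold pvPush at hk
      split at hk
      · rcases List.mem_cons.mp hk with rfl | hk2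
        · exact ⟨by omega, hin⟩
        · have := hdq1mem k ((List.dropWhile_sublist _).subset hk2)
          exact ⟨by omega, this.2⟩
      · have := hdq1mem k hk
        exact ⟨by omega, this.2⟩
    · have hcongr : pvS A C (pvApplyA A i stA (some j)).1 (pvApplyA A i stA (some j)).2.2
          (PySem.List.pyRange (i + 1) n 1)
          = pvS A C stA.1 stA.2.2 (PySem.List.pyRange (i + 1) n 1) := by
        apply pvS_congr
        intro x hx
        have hxi : x ≠ i := by
          have := PySem.List.mem_pyRange_one.mp hx
          omega
        constructor
        · simp [pvApplyA, if_neg hxi]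
        · simp [pvApplyA, if_neg hxi]
      have hfin : (pvPush A C (pvApplyA A i stA (some j)).1 (pvApplyA A i stA (some j)).2.2 i
            (pvEvict (i + Bp) stB.2.2.2)).takeWhile (fun x => decide (x ≤ i - 1 + Bp))
          = (pvS A C (pvApplyA A i stA (some j)).1 (pvApplyA A i stA (some j)).2.2
              (PySem.List.pyRange (i - 1 + 1) n 1)).takeWhile (fun x => decide (x ≤ i - 1 + Bp)) := by
        rw [hrange,
          show (pvS A C (pvApplyA A i stA (some j)).1 (pvApplyA A i stA (some j)).2.2
              (i :: PySem.List.pyRange (i + 1) n 1))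
            = pvPush A C (pvApplyA A i stA (some j)).1 (pvApplyA A i stA (some j)).2.2 i
                (pvS A C (pvApplyA A i stA (some j)).1 (pvApplyA A i stA (some j)).2.2
                  (PySem.List.pyRange (i + 1) n 1)) from rfl,
          hcongr, hdq1, pvS_takeWhile _ _ _ _ _ _ hLpair]
        exact pvPush_takeWhile A C (i - 1 + Bp) (i + Bp) i _ _ _ (by omega) hXpair
      exact hfin

theorem pvMain (A : List Int) (Bp C n : Int) (hn : n = (A.length : Int)) :
    ∀ (k : Nat) (i : Int), i = (k : Int) - 1 → i ≤ n - 1 →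
    ∀ stA stB, pvInv A Bp C n i stA stB →
      (((PySem.List.pyRange i (-1) (-1)).foldl (pvStepA A n Bp C) stA).1
          = ((PySem.List.pyRange i (-1) (-1)).foldl (pvStepB A Bp C) stB).1)
      ∧ (((PySem.List.pyRange i (-1) (-1)).foldl (pvStepA A n Bp C) stA).2.1
          = ((PySem.List.pyRange i (-1) (-1)).foldl (pvStepB A Bp C) stB).2.1) := by
  intro k
  induction k with
  | zero =>
    intro i hi0 hin stA stB hInv
    have hi : i = -1 := by omega
    subst hi
    rw [PySem.List.pyRange_neg_one_eq_nil (by omega)]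
    exact ⟨hInv.1, hInv.2.1⟩
  | succ f ih =>
    intro i hi0 hin stA stB hInv
    have h0i : 0 ≤ i := by omega
    rw [PySem.List.pyRange_neg_one_cons (by omega), List.foldl_cons, List.foldl_cons]
    exact ih (i - 1) (by omega) (by omega) _ _
      (pvStep_inv A Bp C n i hn h0i hin stA stB hInv)

theorem pvInit_getD (A : List Int) (h : A ≠ []) :
    PySem.List.pyGetD A (-1) 0 = PySem.List.pyGetD A ((A.length : Int) - 1) 0 := by
  rw [PySem.List.pyGetD_neg_one A 0 h,
    PySem.List.pyGetD_eq_getElem A 0 (by have := List.length_pos_iff.mpr h; omega) (by omega)]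
  have hlen : 0 < A.length := List.length_pos_iff.mpr h
  have ht : ((A.length : Int) - 1).toNat = A.length - 1 := by omega
  simp only [ht]
  exact List.getLast_eq_getElem h

-- ===== VERDICT (by name: the statement is the Claim_ definition above) =====
theorem cheapestJump_spec : Claim_equal_cheapestJump := by
  intro A B C _hdom hpre
  unfold Spec_cheapestJump
  have hpre' : A ≠ [] := hpre
  have hlen : 0 < A.length := List.length_pos_iff.mpr hpre'
  have hInv0 : pvInv A B C ((A.length : Int)) ((A.length : Int) - 1)
      ((fun j => if j = (A.length : Int) - 1 then some (PySem.List.pyGetD A (-1) 0) else none),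
       (fun _ => (-1 : Int)), (fun _ => (0 : Int)))
      ((fun j => if j = (A.length : Int) - 1
          then some (PySem.List.pyGetD A ((A.length : Int) - 1) 0) else none),
       (fun _ => (-1 : Int)), (fun _ => (0 : Int)), ([] : List Int)) := by
    refine ⟨?_, rfl, rfl, ?_, ?_, ?_, ?_⟩
    · funext j
      by_cases hj : j = (A.length : Int) - 1
      · simp only [if_pos hj, pvInit_getD A hpre']
      · simp only [if_neg hj]
    · intro j _
      exact ⟨rfl, rfl, rfl⟩
    · simp
    · intro k hk
      simp at hk
    · have h1 : (A.length : Int) - 1 + 1 = (A.length : Int) := by omega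
      rw [h1, PySem.List.pyRange_one_eq_nil le_rfl]
      rfl
  have hfin := pvMain A B C ((A.length : Int)) rfl A.length ((A.length : Int) - 1) rfl le_rfl
    _ _ hInv0
  simp only [cheapestJump, cheapestJump_alt]
  rw [hfin.1, hfin.2]
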